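-- pv_equiv track=rewrite | github.com/mkafker/PokerBot | matt/my_bot.py | valid_actions
-- ===== SOURCE A (Python) =====
-- def extract_actions(single_history):
--     """
--     Takes a single string of history (no /) and
--     returns a list of actions in a form such as
--     ['c', '1r', '10r', 'f']
--     """
--     actions = []
--     current_action = ''
--     for item in single_history:
--         if item in ['a', 'c', 'f']:
--             actions.append(item)
--             current_action = ''
--         elif item.isdigit():
--             current_action += item
--         elif item == 'r':
--             actions.append(current_action + item)
--             current_action = ''
--     return actions
--
-- def player_money_bet(action_history):
--     """
--     Returns the amount of money p1 and p2 have bet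
--     (not including the antee) with the format of p1, p2.
--     Assumes that player 1 always moves first for each betting round.
--     """
--     p1_commited = 0
--     p2_commited = 0
--     for history in action_history:
--         p1_temp = 0
--         p2_temp = 0
--         for key, action in enumerate(extract_actions(history)):
--             if key % 2 == 0:
--                 if action == 'c':
--                     p1_temp = p2_temp
--                 elif 'r' in action:
--                     p1_temp = p2_temp + int(action.replace('r', ''))
--                 elif action == 'a':
--                     p1_temp += 1
--             else:
--                 if action == 'c':
--                     p2_temp = p1_temp
--                 elif 'r' in action:
--                     p2_temp = p1_temp + int(action.replace('r', ''))
--                 elif action == 'a':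
--                     p2_temp += 1
--         p1_commited += p1_temp
--         p2_commited += p2_temp
--
--     return p1_commited, p2_commited
--
-- def valid_actions(infoset_key, max_bet):
--     """
--     Returns a list of valid actions based off the tree history.
--     """
--     player_id = infoset_key.split(";")[0]
--     action_history = infoset_key.split(";")[-1].split('/')
--
--     p1_commited, p2_commited = player_money_bet(action_history)
--     if p1_commited > max_bet or p2_commited > max_bet:
--         error_msg = f"P1 or P2 have bet too much money! p1_commited: {p1_commited} and p2_commited: {p2_commited}"
--         error_msg += f" with a max bet of {max_bet}"
--         raise ValueError(error_msg)
--
--     actions = ['c']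
--     if player_id == "P1":
--         if p2_commited > p1_commited: # Being raised against
--             actions = ['f'] + actions
--         for bet_amount in range(1, max_bet + 1 - p2_commited):
--             actions.append(str(bet_amount) + 'r')
--
--     if player_id == "P2":
--         if p1_commited > p2_commited: # Being raised against
--             actions = ['f'] + actions
--         for bet_amount in range(1, max_bet + 1 - p1_commited):
--             actions.append(str(bet_amount) + 'r')
--
--     return actions
-- ===== SOURCE B (Python) =====
-- def valid_actions(infoset_key, max_bet):
--     parts = infoset_key.split(";")
--     player_id, history = parts[0], parts[-1]
--     p1_commited = 0
--     p2_commited = 0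
--     for segment in history.split('/'):
--         temps = [0, 0]
--         idx = 0
--         buf = ''
--         for ch in segment:
--             if ch in 'acf':
--                 if ch == 'c':
--                     temps[idx % 2] = temps[(idx + 1) % 2]
--                 elif ch == 'a':
--                     temps[idx % 2] += 1
--                 idx += 1
--                 buf = ''
--             elif ch.isdigit():
--                 buf += ch
--             elif ch == 'r':
--                 temps[idx % 2] = temps[(idx + 1) % 2] + int(buf)
--                 idx += 1
--                 buf = ''
--         p1_commited += temps[0]
--         p2_commited += temps[1]
--     if p1_commited > max_bet or p2_commited > max_bet:
--         error_msg = f"P1 or P2 have bet too much money! p1_commited: {p1_commited} and p2_commited: {p2_commited}"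
--         error_msg += f" with a max bet of {max_bet}"
--         raise ValueError(error_msg)
--     if player_id in ("P1", "P2"):
--         theirs = p2_commited if player_id == "P1" else p1_commited
--         mine = p1_commited + p2_commited - theirs
--         actions = (['f'] if theirs > mine else []) + ['c']
--         actions += [str(k) + 'r' for k in range(1, max_bet + 1 - theirs)]
--     else:
--         actions = ['c']
--     return actions
-- ===== Notes on version B (the rewrite author's own statement) =====
-- stated objective: simpler
-- what changed: Replaces A's two-stage design (tokenize each round into an action-string list, then re-parse each token with string tests, 'r'-stripping and int()) by a single direct scan of each round's characters that accumulates the two players' committed amounts with a digit buffer and an alternating turn flag, and unifies the duplicated P1/P2 action-building blocks into one.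
import Mathlib
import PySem

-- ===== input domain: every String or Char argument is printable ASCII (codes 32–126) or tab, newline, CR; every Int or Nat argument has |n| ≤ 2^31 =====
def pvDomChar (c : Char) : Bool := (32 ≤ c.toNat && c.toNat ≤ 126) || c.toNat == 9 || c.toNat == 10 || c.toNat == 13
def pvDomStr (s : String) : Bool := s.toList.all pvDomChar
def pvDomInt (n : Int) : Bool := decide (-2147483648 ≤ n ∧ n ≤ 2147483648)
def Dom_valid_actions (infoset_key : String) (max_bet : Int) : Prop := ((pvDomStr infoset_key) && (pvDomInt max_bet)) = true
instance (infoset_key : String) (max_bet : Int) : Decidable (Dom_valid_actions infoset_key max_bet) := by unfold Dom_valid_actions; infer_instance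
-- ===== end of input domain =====

-- B replaces A's tokenize-then-reparse commitment computation by one direct character scan per
-- betting round and unifies the duplicated P1/P2 action-building blocks (objective: simpler).

-- ===== PORT A =====
-- extract_actions: for-loop with state (actions, current_action); strings modelled as List Char
def pvExtractStep (st : List (List Char) × List Char) (ch : Char) : List (List Char) × List Char :=
  if ch = 'a' ∨ ch = 'c' ∨ ch = 'f' then (st.1 ++ [[ch]], [])
  else if PySem.Chars.isdigit ch then (st.1, st.2 ++ [ch])
  else if ch = 'r' then (st.1 ++ [st.2 ++ ['r']], [])
  else st

def pvExtractActions (s : List Char) : List (List Char) := (s.foldl pvExtractStep ([], [])).1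

-- inner loop of player_money_bet: 'for key, action in enumerate(...)' with state (key, p1_temp, p2_temp)
def pvPMStep (st : Nat × Int × Int) (action : List Char) : Nat × Int × Int :=
  if st.1 % 2 = 0 then
    (st.1 + 1,
     (if action = ['c'] then st.2.2
      else if PySem.Chars.isIn ['r'] action then
        st.2.2 + (PySem.Int.ofChars? (PySem.Chars.replace action ['r'] [])).getD 0   -- int('') raises: Pre_ excludes
      else if action = ['a'] then st.2.1 + 1 else st.2.1),
     st.2.2)
  else
    (st.1 + 1, st.2.1,
     (if action = ['c'] then st.2.1
      else if PySem.Chars.isIn ['r'] action then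
        st.2.1 + (PySem.Int.ofChars? (PySem.Chars.replace action ['r'] [])).getD 0
      else if action = ['a'] then st.2.2 + 1 else st.2.2))

def pvPlayerMoneyBet (action_history : List (List Char)) : Int × Int :=
  action_history.foldl (fun acc h =>
    let st := (pvExtractActions h).foldl pvPMStep (0, 0, 0)
    (acc.1 + st.2.1, acc.2 + st.2.2)) (0, 0)

def valid_actions (infoset_key : String) (max_bet : Int) : List String :=
  let parts := PySem.Chars.splitOn infoset_key.toList [';']
  let player_id := parts.headD []                                  -- split always nonempty: [0]
  let action_history := PySem.Chars.splitOn (parts.getLastD []) ['/']   -- [-1]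
  let pc := pvPlayerMoneyBet action_history
  if pc.1 > max_bet ∨ pc.2 > max_bet then []                       -- Python raises ValueError here; Pre_ excludes
  else
    let actions := ["c"]
    let actions := if player_id = ['P', '1'] then
        (if pc.2 > pc.1 then "f" :: actions else actions)
          ++ (PySem.List.pyRange 1 (max_bet + 1 - pc.2) 1).map
               (fun k => String.ofList (PySem.Int.toChars k ++ ['r']))   -- str(bet_amount) + 'r'
      else actions
    let actions := if player_id = ['P', '2'] then
        (if pc.1 > pc.2 then "f" :: actions else actions)
          ++ (PySem.List.pyRange 1 (max_bet + 1 - pc.1) 1).map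
               (fun k => String.ofList (PySem.Int.toChars k ++ ['r']))
      else actions
    actions

-- ===== PORT B =====
-- one direct scan of a round: state (buf, even = 'player 1 to act', t1, t2)
def pvScanB : List Char → List Char → Bool → Int → Int → Int × Int
  | [], _, _, t1, t2 => (t1, t2)
  | ch :: cs, buf, even, t1, t2 =>
    if ch = 'a' ∨ ch = 'c' ∨ ch = 'f' then
      if ch = 'c' then
        if even then pvScanB cs [] (!even) t2 t2 else pvScanB cs [] (!even) t1 t1
      else if ch = 'a' then
        if even then pvScanB cs [] (!even) (t1 + 1) t2 else pvScanB cs [] (!even) t1 (t2 + 1)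
      else pvScanB cs [] (!even) t1 t2
    else if PySem.Chars.isdigit ch then pvScanB cs (buf ++ [ch]) even t1 t2
    else if ch = 'r' then
      if even then pvScanB cs [] (!even) (t2 + (PySem.Int.ofChars? buf).getD 0) t2   -- int('') raises: Pre_ excludes
      else pvScanB cs [] (!even) t1 (t1 + (PySem.Int.ofChars? buf).getD 0)
    else pvScanB cs buf even t1 t2

def valid_actions_alt (infoset_key : String) (max_bet : Int) : List String :=
  let parts := PySem.Chars.splitOn infoset_key.toList [';']
  let player_id := parts.headD []
  let segments := PySem.Chars.splitOn (parts.getLastD []) ['/']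
  let pc := segments.foldl (fun acc seg =>
      let t := pvScanB seg [] true 0 0
      (acc.1 + t.1, acc.2 + t.2)) (0, 0)
  if pc.1 > max_bet ∨ pc.2 > max_bet then []                       -- Source B raises the same ValueError; Pre_ excludes
  else if player_id = ['P', '1'] ∨ player_id = ['P', '2'] then
    let theirs := if player_id = ['P', '1'] then pc.2 else pc.1
    let mine := pc.1 + pc.2 - theirs
    (if theirs > mine then ["f"] else []) ++ ["c"]
      ++ (PySem.List.pyRange 1 (max_bet + 1 - theirs) 1).map
           (fun k => String.ofList (PySem.Int.toChars k ++ ['r']))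
  else ["c"]

-- ===== PRECONDITION & SPEC =====
-- Pre_ states exactly the condition under which the Python A returns: every 'r' in the history
-- is preceded by at least one digit since the last action (otherwise int('') raises ValueError),
-- and the committed amounts — a sum over the history, recomputed here independently of both
-- ports — do not exceed max_bet (otherwise A raises its explicit ValueError guard).
def pvPreSeg : List Char → List Char → Bool → Int → Int → Option (Int × Int)
  | [], _, _, t1, t2 => some (t1, t2)
  | ch :: cs, buf, even, t1, t2 =>
    if ch = 'r' then
      match PySem.Int.ofChars? buf with
      | none => none
      | some v => pvPreSeg cs [] (!even) (if even then t2 + v else t1) (if even then t2 else t1 + v)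
    else if ch = 'c' then pvPreSeg cs [] (!even) (if even then t2 else t1) (if even then t2 else t1)
    else if ch = 'a' then pvPreSeg cs [] (!even) (if even then t1 + 1 else t1) (if even then t2 else t2 + 1)
    else if ch = 'f' then pvPreSeg cs [] (!even) t1 t2
    else if PySem.Chars.isdigit ch then pvPreSeg cs (buf ++ [ch]) even t1 t2
    else pvPreSeg cs buf even t1 t2

def pvPreOk (infoset_key : String) (max_bet : Int) : Bool :=
  let parts := PySem.Chars.splitOn infoset_key.toList [';']
  let segments := PySem.Chars.splitOn (parts.getLastD []) ['/']
  match segments.foldl (fun acc seg =>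
      match acc, pvPreSeg seg [] true 0 0 with
      | some (a, b), some (x, y) => some (a + x, b + y)
      | _, _ => none) (some (0, 0)) with
  | none => false
  | some (p1, p2) => decide (p1 ≤ max_bet) && decide (p2 ≤ max_bet)

def Pre_valid_actions (infoset_key : String) (max_bet : Int) : Prop :=
  pvPreOk infoset_key max_bet = true
instance (infoset_key : String) (max_bet : Int) : Decidable (Pre_valid_actions infoset_key max_bet) := by
  unfold Pre_valid_actions; infer_instance

def pvWitness_valid_actions : String × Int := ("P1;1rc/c", 3)

def Spec_valid_actions (infoset_key : String) (max_bet : Int) (out : List String) : Prop := out = valid_actions_alt infoset_key max_bet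
instance (infoset_key : String) (max_bet : Int) (out : List String) : Decidable (Spec_valid_actions infoset_key max_bet out) := by unfold Spec_valid_actions; infer_instance

-- ===== CLAIM (what is proved, stated in full; the proofs are below) =====
def Claim_equal_valid_actions : Prop := ∀ (infoset_key : String) (max_bet : Int), Dom_valid_actions infoset_key max_bet → Pre_valid_actions infoset_key max_bet → Spec_valid_actions infoset_key max_bet (valid_actions infoset_key max_bet)

-- ===== LEMMAS AND PROOFS =====

-- emit-style view of A's extract_actions loop
def pvEmit : List Char → List Char → List (List Char)
  | [], _ => []
  | ch :: cs, cur =>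
    if ch = 'a' ∨ ch = 'c' ∨ ch = 'f' then [ch] :: pvEmit cs []
    else if PySem.Chars.isdigit ch then pvEmit cs (cur ++ [ch])
    else if ch = 'r' then (cur ++ ['r']) :: pvEmit cs []
    else pvEmit cs cur

lemma pvExtract_emit (cs : List Char) : ∀ (acc : List (List Char)) (cur : List Char),
    (cs.foldl pvExtractStep (acc, cur)).1 = acc ++ pvEmit cs cur := by
  induction cs with
  | nil => intro acc cur; simp [pvEmit]
  | cons ch cs ih =>
    intro acc cur
    simp only [List.foldl_cons, pvExtractStep, pvEmit]
    split_ifs with h1 h2 h3 <;> simp [ih]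

-- parity-style view of A's enumerate loop
def pvPMVal (a : List Char) (other mine : Int) : Int :=
  if a = ['c'] then other
  else if PySem.Chars.isIn ['r'] a then
    other + (PySem.Int.ofChars? (PySem.Chars.replace a ['r'] [])).getD 0
  else if a = ['a'] then mine + 1 else mine

def pvPMGo : List (List Char) → Bool → Int → Int → Int × Int
  | [], _, t1, t2 => (t1, t2)
  | a :: as, even, t1, t2 =>
    if even then pvPMGo as (!even) (pvPMVal a t2 t1) t2
    else pvPMGo as (!even) t1 (pvPMVal a t1 t2)

lemma pvPM_go (acts : List (List Char)) : ∀ (k : Nat) (t1 t2 : Int),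
    (acts.foldl pvPMStep (k, t1, t2)).2 = pvPMGo acts (decide (k % 2 = 0)) t1 t2 := by
  induction acts with
  | nil => intro k t1 t2; simp [pvPMGo]
  | cons a as ih =>
    intro k t1 t2
    have hpar : (decide ((k + 1) % 2 = 0)) = !(decide (k % 2 = 0)) := by
      rcases Nat.mod_two_eq_zero_or_one k with h | h <;> simp [Nat.add_mod, h]
    by_cases h : k % 2 = 0 <;>
      simp [List.foldl_cons, pvPMStep, pvPMGo, pvPMVal, h, ih, hpar]

lemma pvReplace_go (buf : List Char) : ∀ (acc : List Char) (fuel : Nat),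
    buf.length + 1 ≤ fuel → 'r' ∉ buf →
    PySem.Chars.replace.go ['r'] [] fuel (buf ++ ['r']) acc = acc.reverse ++ buf := by
  induction buf with
  | nil =>
    intro acc fuel hf _
    match fuel, hf with
    | fuel + 1, _ =>
      cases fuel <;> simp [PySem.Chars.replace.go]
  | cons c rest ih =>
    intro acc fuel hf hr
    match fuel, hf with
    | fuel + 1, hf =>
      have hc : c ≠ 'r' := fun h => hr (by simp [h])
      have step : PySem.Chars.replace.go ['r'] [] (fuel + 1) ((c :: rest) ++ ['r']) acc
          = PySem.Chars.replace.go ['r'] [] fuel (rest ++ ['r']) (c :: acc) := by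
        simp only [PySem.Chars.replace.go, List.cons_append]
        rw [if_neg (by simp [List.isPrefixOf]; exact fun h => hc h.symm)]
      rw [step, ih (c :: acc) fuel (by simpa using Nat.succ_le_succ_iff.mp hf)
          (fun h => hr (List.mem_cons_of_mem _ h))]
      simp

lemma pvReplace_r (buf : List Char) (hr : 'r' ∉ buf) :
    PySem.Chars.replace (buf ++ ['r']) ['r'] [] = buf := by
  have := pvReplace_go buf [] (buf.length + 1) le_rfl hr
  simpa [PySem.Chars.replace] using this

lemma pvAppend_r_ne_single (buf : List Char) (b : Char) (hb : b ≠ 'r') : buf ++ ['r'] ≠ [b] := by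
  cases buf with
  | nil => simpa using Ne.symm hb
  | cons x xs => simp

lemma pvIsIn_r (buf : List Char) : PySem.Chars.isIn ['r'] (buf ++ ['r']) = true := by
  rw [PySem.Chars.isIn_iff_infix]
  exact ⟨buf, [], by simp⟩

lemma pvPMVal_c (o m : Int) : pvPMVal ['c'] o m = o := by
  simp [pvPMVal]

lemma pvPMVal_a (o m : Int) : pvPMVal ['a'] o m = m + 1 := by
  simp [pvPMVal, show PySem.Chars.isIn ['r'] ['a'] = false from by decide]

lemma pvPMVal_f (o m : Int) : pvPMVal ['f'] o m = m := by
  simp [pvPMVal, show PySem.Chars.isIn ['r'] ['f'] = false from by decide]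

lemma pvPMVal_r (buf : List Char) (o m : Int) (hr : 'r' ∉ buf) :
    pvPMVal (buf ++ ['r']) o m = o + (PySem.Int.ofChars? buf).getD 0 := by
  simp only [pvPMVal]
  rw [if_neg (pvAppend_r_ne_single buf 'c' (by decide)), if_pos (pvIsIn_r buf),
    pvReplace_r buf hr]

lemma pvScan_pm (cs : List Char) : ∀ (buf : List Char) (even : Bool) (t1 t2 : Int),
    'r' ∉ buf → pvScanB cs buf even t1 t2 = pvPMGo (pvEmit cs buf) even t1 t2 := by
  induction cs with
  | nil => intro buf even t1 t2 _; simp [pvScanB, pvEmit, pvPMGo]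
  | cons ch cs ih =>
    intro buf even t1 t2 hr
    by_cases hacf : ch = 'a' ∨ ch = 'c' ∨ ch = 'f'
    · rcases hacf with h | h | h <;> subst h <;>
        cases even <;>
          simp [pvScanB, pvEmit, pvPMGo, pvPMVal_a, pvPMVal_c, pvPMVal_f,
                ih [] _ _ _ (by simp)]
    · by_cases hd : PySem.Chars.isdigit ch = true
      · have hch : ch ≠ 'r' := by intro h; subst h; simp [PySem.Chars.isdigit] at hd
        have hr' : 'r' ∉ buf ++ [ch] := by
          intro h; rcases List.mem_append.mp h with h | h
          · exact hr h
          · simp at h; exact hch h.symm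
        simp [pvScanB, pvEmit, hacf, hd, ih _ _ _ _ hr']
      · by_cases hrch : ch = 'r'
        · subst hrch
          cases even <;>
            simp [pvScanB, pvEmit, pvPMGo, hd, pvPMVal_r buf _ _ hr,
                  ih [] _ _ _ (by simp)]
        · simp [pvScanB, pvEmit, hacf, hd, hrch, ih _ _ _ _ hr]

lemma pvSeg_eq (seg : List Char) :
    pvScanB seg [] true 0 0 = ((pvExtractActions seg).foldl pvPMStep (0, 0, 0)).2 := by
  rw [pvPM_go, pvScan_pm seg [] true 0 0 (by simp)]
  have : pvExtractActions seg = pvEmit seg [] := by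
    simpa using pvExtract_emit seg [] []
  rw [this]
  norm_num

lemma pvCommits_eq (segs : List (List Char)) (acc : Int × Int) :
    segs.foldl (fun acc seg =>
        let t := pvScanB seg [] true 0 0
        (acc.1 + t.1, acc.2 + t.2)) acc
      = segs.foldl (fun acc h =>
          let st := (pvExtractActions h).foldl pvPMStep (0, 0, 0)
          (acc.1 + st.2.1, acc.2 + st.2.2)) acc := by
  simp only [pvSeg_eq]

-- ===== VERDICT (by name: the statement is the Claim_ definition above) =====
theorem valid_actions_spec : Claim_equal_valid_actions := by
  intro infoset_key max_bet _ _
  unfold Spec_valid_actions valid_actions valid_actions_alt pvPlayerMoneyBet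
  simp only [pvCommits_eq]
  set pid := (PySem.Chars.splitOn infoset_key.toList [';']).headD [] with hpid
  set pc := (PySem.Chars.splitOn ((PySem.Chars.splitOn infoset_key.toList [';']).getLastD [])
      ['/']).foldl (fun acc h =>
        let st := (pvExtractActions h).foldl pvPMStep (0, 0, 0)
        (acc.1 + st.2.1, acc.2 + st.2.2)) ((0 : Int), (0 : Int)) with hpc
  by_cases hg : pc.1 > max_bet ∨ pc.2 > max_bet
  · simp [hg]
  · have hm2 : pc.1 + pc.2 - pc.2 = pc.1 := by ring
    have hm1 : pc.1 + pc.2 - pc.1 = pc.2 := by ring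
    by_cases h1 : pid = ['P', '1']
    · have h2 : pid ≠ ['P', '2'] := by rw [h1]; decide
      by_cases hf : pc.2 > pc.1 <;> simp [hg, h1, hm2, hf]
    · by_cases h2 : pid = ['P', '2']
      · by_cases hf : pc.1 > pc.2 <;> simp [hg, h2, hm1, hf]
      · simp [hg, h1, h2]
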